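-- pv_equiv track=rewrite | github.com/Abhijit0303/leetcode-problems | POTD/trionic-array-i.py | isTrionic
-- ===== SOURCE A (Python) =====
-- from typing import List
--
-- def isTrionic(nums: List[int]) -> bool:
--     n = len(nums)
--     i = 0
--
--     while i + 1 < n and nums[i] < nums[i + 1]:
--         i += 1
--     if i == 0:
--         return False
--
--     j = i
--     while j + 1 < n and nums[j] > nums[j + 1]:
--         j += 1
--     if j == i:
--         return False
--
--     k = j
--     while k + 1 < n and nums[k] < nums[k + 1]:
--         k += 1
--     if k == j:
--         return False
--
--     return k == n - 1
-- ===== SOURCE B (Python) =====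
-- from typing import List
--
-- def isTrionic(nums: List[int]) -> bool:
--     # sign of each consecutive difference: +1 / -1 / 0
--     signs = [(b > a) - (b < a) for a, b in zip(nums, nums[1:])]
--     # compress into run values (dedup consecutive)
--     runs = []
--     for s in signs:
--         if not runs or runs[-1] != s:
--             runs.append(s)
--     return runs == [1, -1, 1]
-- ===== Notes on version B (the rewrite author's own statement) =====
-- stated objective: alternative
-- what changed: Replaced A's three sequential pointer-walk while-loops over indices with a single pass building the signs of consecutive differences followed by a consecutive-run compression, returning whether the run values are exactly one increasing run, one decreasing run, then one increasing run.
import Mathlib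
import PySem

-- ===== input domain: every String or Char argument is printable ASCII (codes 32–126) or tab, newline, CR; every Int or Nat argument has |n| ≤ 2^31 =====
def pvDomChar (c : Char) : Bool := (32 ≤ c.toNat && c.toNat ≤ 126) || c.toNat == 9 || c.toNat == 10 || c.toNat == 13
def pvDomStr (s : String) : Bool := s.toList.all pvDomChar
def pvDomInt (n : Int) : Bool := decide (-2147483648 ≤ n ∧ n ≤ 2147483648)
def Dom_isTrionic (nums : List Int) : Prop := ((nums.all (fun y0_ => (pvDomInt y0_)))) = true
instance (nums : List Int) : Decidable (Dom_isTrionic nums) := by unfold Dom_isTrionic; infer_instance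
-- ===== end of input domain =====

-- B re-implements A's three pointer-walk loops as one pass of difference signs plus
-- a consecutive-run compression; alternative decomposition, no speed claim.

-- ===== PORT A =====
-- 'while i + 1 < n and nums[i] < nums[i + 1]: i += 1' as fuel recursion on the counter;
-- fuel = n suffices since the counter increases and the guard needs i + 1 < n.
-- the guard makes both indexes in range, so '.getD 0' after pyGet? is never taken.
def pvClimbUp (nums : List Int) : Nat → Nat → Nat
  | 0, i => i
  | fuel + 1, i =>
    if i + 1 < nums.length ∧
        (PySem.List.pyGet? nums (i : Int)).getD 0 < (PySem.List.pyGet? nums ((i : Int) + 1)).getD 0 then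
      pvClimbUp nums fuel (i + 1)
    else i

def pvClimbDown (nums : List Int) : Nat → Nat → Nat
  | 0, i => i
  | fuel + 1, i =>
    if i + 1 < nums.length ∧
        (PySem.List.pyGet? nums (i : Int)).getD 0 > (PySem.List.pyGet? nums ((i : Int) + 1)).getD 0 then
      pvClimbDown nums fuel (i + 1)
    else i

def isTrionic (nums : List Int) : Bool :=
  let n := nums.length
  let i := pvClimbUp nums n 0
  if i = 0 then false
  else
    let j := pvClimbDown nums n i
    if j = i then false
    else
      let k := pvClimbUp nums n j
      if k = j then false
      else decide ((k : Int) = (n : Int) - 1)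

-- ===== PORT B =====
-- sign of one consecutive difference: (b > a) - (b < a)
def pvSign (a b : Int) : Int := (if b > a then 1 else 0) - (if b < a then 1 else 0)

-- the loop body of Source B's run-compression loop
def pvAppendRun (runs : List Int) (s : Int) : List Int :=
  if runs = [] ∨ runs.getLast? ≠ some s then runs ++ [s] else runs

def isTrionic_alt (nums : List Int) : Bool :=
  let signs := (nums.zip nums.tail).map (fun p => pvSign p.1 p.2)
  let runs := signs.foldl pvAppendRun []
  decide (runs = [1, -1, 1])

-- ===== PRECONDITION & SPEC =====
def Spec_isTrionic (nums : List Int) (out : Bool) : Prop := out = isTrionic_alt nums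
instance (nums : List Int) (out : Bool) : Decidable (Spec_isTrionic nums out) := by unfold Spec_isTrionic; infer_instance

-- ===== CLAIM (what is proved, stated in full; the proofs are below) =====
def Claim_equal_isTrionic : Prop := ∀ (nums : List Int), Dom_isTrionic nums → Spec_isTrionic nums (isTrionic nums)

-- ===== LEMMAS AND PROOFS =====

-- the sign list B builds, named for the proofs
def pvSigns (nums : List Int) : List Int := (nums.zip nums.tail).map (fun p => pvSign p.1 p.2)

-- run compression, recursively (used only to reason about B's foldl)
def pvCmp (p : Int) : List Int → List Int
  | [] => []
  | x :: xs => if x = p then pvCmp p xs else x :: pvCmp x xs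

def pvRuns : List Int → List Int
  | [] => []
  | x :: xs => x :: pvCmp x xs

theorem pvSigns_length (nums : List Int) : (pvSigns nums).length = nums.length - 1 := by
  simp [pvSigns]

theorem pvSigns_getElem (nums : List Int) (i : Nat) (h : i < (pvSigns nums).length) :
    (pvSigns nums)[i] =
      pvSign (nums[i]'(by simp [pvSigns] at h ⊢; omega))
        (nums[i + 1]'(by simp [pvSigns] at h ⊢; omega)) := by
  simp [pvSigns]

theorem pvSign_eq_one (a b : Int) : pvSign a b = 1 ↔ a < b := by
  unfold pvSign; split_ifs <;> omega

theorem pvSign_eq_negone (a b : Int) : pvSign a b = -1 ↔ b < a := by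
  unfold pvSign; split_ifs <;> omega

theorem pvGet_eq (nums : List Int) (i : Nat) (h : i < nums.length) :
    (PySem.List.pyGet? nums (i : Int)).getD 0 = nums[i] := by
  rw [PySem.List.pyGet?_natCast]
  simp [List.getElem?_eq_getElem, h]

theorem pvClimbUp_spec (nums : List Int) :
    ∀ (fuel i : Nat), nums.length - 1 - i ≤ fuel →
      pvClimbUp nums fuel i = i + (((pvSigns nums).drop i).takeWhile (fun x => x == 1)).length := by
  intro fuel
  induction fuel with
  | zero =>
    intro i h
    have : (pvSigns nums).drop i = [] := by
      apply List.drop_eq_nil_of_le; rw [pvSigns_length]; omega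
    simp [pvClimbUp, this]
  | succ f ih =>
    intro i h
    rw [pvClimbUp]
    have hlen := pvSigns_length nums
    by_cases hc : i + 1 < nums.length ∧
        (PySem.List.pyGet? nums (i : Int)).getD 0 < (PySem.List.pyGet? nums ((i : Int) + 1)).getD 0
    · rw [if_pos hc]
      obtain ⟨h1, h2⟩ := hc
      rw [pvGet_eq nums i (by omega)] at h2
      have : ((i : Int) + 1) = ((i + 1 : Nat) : Int) := by push_cast; ring
      rw [this, pvGet_eq nums (i + 1) (by omega)] at h2
      have hi : i < (pvSigns nums).length := by omega
      have hdrop : (pvSigns nums).drop i = (pvSigns nums)[i] :: (pvSigns nums).drop (i + 1) :=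
        List.drop_eq_getElem_cons hi
      have hs1 : (pvSigns nums)[i] = 1 := by
        rw [pvSigns_getElem nums i hi]; exact (pvSign_eq_one _ _).mpr h2
      rw [ih (i + 1) (by omega), hdrop, hs1]
      simp [List.takeWhile_cons]
      omega
    · rw [if_neg hc]
      by_cases h1 : i + 1 < nums.length
      · have h2 : ¬ (PySem.List.pyGet? nums (i : Int)).getD 0 < (PySem.List.pyGet? nums ((i : Int) + 1)).getD 0 :=
          fun h' => hc ⟨h1, h'⟩
        rw [pvGet_eq nums i (by omega)] at h2
        have hcast : ((i : Int) + 1) = ((i + 1 : Nat) : Int) := by push_cast; ring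
        rw [hcast, pvGet_eq nums (i + 1) (by omega)] at h2
        have hi : i < (pvSigns nums).length := by omega
        have hdrop : (pvSigns nums).drop i = (pvSigns nums)[i] :: (pvSigns nums).drop (i + 1) :=
          List.drop_eq_getElem_cons hi
        have hs1 : ((pvSigns nums)[i] == 1) = false := by
          rw [pvSigns_getElem nums i hi]
          simp only [beq_eq_false_iff_ne, ne_eq]
          intro he
          exact h2 ((pvSign_eq_one _ _).mp he)
        rw [hdrop, List.takeWhile_cons, hs1]
        simp
      · have hnil : (pvSigns nums).drop i = [] := by
          apply List.drop_eq_nil_of_le; omega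
        simp [hnil]


theorem pvClimbDown_spec (nums : List Int) :
    ∀ (fuel i : Nat), nums.length - 1 - i ≤ fuel →
      pvClimbDown nums fuel i = i + (((pvSigns nums).drop i).takeWhile (fun x => x == -1)).length := by
  intro fuel
  induction fuel with
  | zero =>
    intro i h
    have : (pvSigns nums).drop i = [] := by
      apply List.drop_eq_nil_of_le; rw [pvSigns_length]; omega
    simp [pvClimbDown, this]
  | succ f ih =>
    intro i h
    rw [pvClimbDown]
    have hlen := pvSigns_length nums
    by_cases hc : i + 1 < nums.length ∧
        (PySem.List.pyGet? nums (i : Int)).getD 0 > (PySem.List.pyGet? nums ((i : Int) + 1)).getD 0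
    · rw [if_pos hc]
      obtain ⟨h1, h2⟩ := hc
      rw [pvGet_eq nums i (by omega)] at h2
      have hcast : ((i : Int) + 1) = ((i + 1 : Nat) : Int) := by push_cast; ring
      rw [hcast, pvGet_eq nums (i + 1) (by omega)] at h2
      have hi : i < (pvSigns nums).length := by omega
      have hdrop : (pvSigns nums).drop i = (pvSigns nums)[i] :: (pvSigns nums).drop (i + 1) :=
        List.drop_eq_getElem_cons hi
      have hs1 : (pvSigns nums)[i] = -1 := by
        rw [pvSigns_getElem nums i hi]; exact (pvSign_eq_negone _ _).mpr h2
      rw [ih (i + 1) (by omega), hdrop, hs1]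
      simp [List.takeWhile_cons]
      omega
    · rw [if_neg hc]
      by_cases h1 : i + 1 < nums.length
      · have h2 : ¬ (PySem.List.pyGet? nums (i : Int)).getD 0 > (PySem.List.pyGet? nums ((i : Int) + 1)).getD 0 :=
          fun h' => hc ⟨h1, h'⟩
        rw [pvGet_eq nums i (by omega)] at h2
        have hcast : ((i : Int) + 1) = ((i + 1 : Nat) : Int) := by push_cast; ring
        rw [hcast, pvGet_eq nums (i + 1) (by omega)] at h2
        have hi : i < (pvSigns nums).length := by omega
        have hdrop : (pvSigns nums).drop i = (pvSigns nums)[i] :: (pvSigns nums).drop (i + 1) :=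
          List.drop_eq_getElem_cons hi
        have hs1 : ((pvSigns nums)[i] == -1) = false := by
          rw [pvSigns_getElem nums i hi]
          simp only [beq_eq_false_iff_ne, ne_eq]
          intro he
          exact h2 ((pvSign_eq_negone _ _).mp he)
        rw [hdrop, List.takeWhile_cons, hs1]
        simp
      · have hnil : (pvSigns nums).drop i = [] := by
          apply List.drop_eq_nil_of_le; omega
        simp [hnil]

-- B's foldl loop computes the recursive run compression
theorem foldl_pvAppendRun (s : List Int) :
    ∀ (acc : List Int) (p : Int),
      s.foldl pvAppendRun (acc ++ [p]) = acc ++ p :: pvCmp p s := by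
  induction s with
  | nil => intro acc p; simp [pvCmp]
  | cons x xs ih =>
    intro acc p
    rw [List.foldl_cons]
    by_cases hpx : p = x
    · have hstep : pvAppendRun (acc ++ [p]) x = acc ++ [p] := by
        unfold pvAppendRun
        rw [if_neg]
        simp [List.getLast?_concat, hpx]
      rw [hstep, ih acc p]
      simp [pvCmp, hpx]
    · have hstep : pvAppendRun (acc ++ [p]) x = (acc ++ [p]) ++ [x] := by
        unfold pvAppendRun
        rw [if_pos]
        right
        simp [List.getLast?_concat]
        omega
      rw [hstep, ih (acc ++ [p]) x]
      simp [pvCmp]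
      intro h; exact absurd h.symm hpx

theorem foldl_pvAppendRun_nil (s : List Int) :
    s.foldl pvAppendRun [] = pvRuns s := by
  cases s with
  | nil => simp [pvRuns]
  | cons x xs =>
    rw [List.foldl_cons]
    have hstep : pvAppendRun [] x = [] ++ [x] := by simp [pvAppendRun]
    rw [hstep, foldl_pvAppendRun xs [] x]
    simp [pvRuns]

theorem dropWhile_eq_drop_takeWhile (q : Int → Bool) (t : List Int) :
    t.dropWhile q = t.drop (t.takeWhile q).length := by
  induction t with
  | nil => simp
  | cons x xs ih =>
    by_cases hx : q x
    · simp [List.dropWhile_cons, List.takeWhile_cons, hx, ih]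
    · simp [List.dropWhile_cons, List.takeWhile_cons, hx]

theorem pvCmp_eq_pvRuns (t : List Int) :
    ∀ (p : Int), pvCmp p t = pvRuns (t.dropWhile (fun x => x == p)) := by
  induction t with
  | nil => intro p; simp [pvCmp, pvRuns]
  | cons x xs ih =>
    intro p
    by_cases hx : x = p
    · simp [pvCmp, hx, ih p]
    · simp [pvCmp, hx, pvRuns]

theorem pvRuns_eq_nil (t : List Int) : pvRuns t = [] ↔ t = [] := by
  cases t <;> simp [pvRuns]

theorem pvRuns_eq_cons (s : List Int) (v : Int) (r : List Int) :
    pvRuns s = v :: r ↔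
      (s.takeWhile (fun x => x == v)).length ≠ 0 ∧
        pvRuns (s.drop (s.takeWhile (fun x => x == v)).length) = r := by
  cases s with
  | nil => simp [pvRuns]
  | cons x xs =>
    by_cases hx : x = v
    · subst hx
      rw [pvRuns, List.cons_eq_cons]
      have hdw : (x :: xs).drop ((x :: xs).takeWhile (fun y => y == x)).length
          = xs.dropWhile (fun y => y == x) := by
        rw [← dropWhile_eq_drop_takeWhile, List.dropWhile_cons]
        simp
      rw [hdw, ← pvCmp_eq_pvRuns xs x]
      simp
    · constructor
      · intro h
        rw [pvRuns] at h
        exact absurd (List.cons_eq_cons.mp h).1 hx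
      · rintro ⟨hne, -⟩
        exfalso
        apply hne
        rw [List.takeWhile_cons]
        simp [hx]

-- the three phase lengths of the sign list
def pvA (s : List Int) : Nat := (s.takeWhile (fun x => x == 1)).length
def pvB (s : List Int) : Nat := ((s.drop (pvA s)).takeWhile (fun x => x == -1)).length
def pvC (s : List Int) : Nat := ((s.drop (pvA s + pvB s)).takeWhile (fun x => x == 1)).length

theorem pvA_le (s : List Int) : pvA s ≤ s.length := (List.takeWhile_sublist _).length_le

theorem pvB_le (s : List Int) : pvB s ≤ s.length - pvA s := by
  have h : pvB s ≤ (s.drop (pvA s)).length := (List.takeWhile_sublist _).length_le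
  simpa using h

theorem pvC_le (s : List Int) : pvC s ≤ s.length - (pvA s + pvB s) := by
  have h : pvC s ≤ (s.drop (pvA s + pvB s)).length := (List.takeWhile_sublist _).length_le
  simpa using h

-- characterisation of B: the run values are exactly [1, -1, 1]
theorem pvRuns_char (s : List Int) :
    (pvRuns s = [1, -1, 1]) ↔
      (pvA s ≠ 0 ∧ pvB s ≠ 0 ∧ pvC s ≠ 0 ∧ s.drop (pvA s + pvB s + pvC s) = []) := by
  simp only [pvA, pvB, pvC]
  rw [pvRuns_eq_cons, pvRuns_eq_cons, pvRuns_eq_cons, pvRuns_eq_nil]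
  rw [List.drop_drop, List.drop_drop]

theorem isTrionic_eq_alt (nums : List Int) : isTrionic nums = isTrionic_alt nums := by
  have halt : isTrionic_alt nums = decide (pvRuns (pvSigns nums) = [1, -1, 1]) := by
    show decide (((nums.zip nums.tail).map fun p => pvSign p.1 p.2).foldl pvAppendRun [] = [1, -1, 1])
        = _
    rw [show ((nums.zip nums.tail).map fun p => pvSign p.1 p.2) = pvSigns nums from rfl,
      foldl_pvAppendRun_nil]
  have hrw : decide (pvRuns (pvSigns nums) = [1, -1, 1])
      = decide (pvA (pvSigns nums) ≠ 0 ∧ pvB (pvSigns nums) ≠ 0 ∧ pvC (pvSigns nums) ≠ 0 ∧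
          (pvSigns nums).drop (pvA (pvSigns nums) + pvB (pvSigns nums) + pvC (pvSigns nums)) = []) :=
    decide_eq_decide.mpr (pvRuns_char (pvSigns nums))
  rw [halt, hrw]
  unfold isTrionic
  simp only []
  have hlen := pvSigns_length nums
  have hale := pvA_le (pvSigns nums)
  have hble := pvB_le (pvSigns nums)
  have hcle := pvC_le (pvSigns nums)
  have hi := pvClimbUp_spec nums nums.length 0 (by omega)
  simp only [Nat.zero_add, List.drop_zero] at hi
  rw [show ((pvSigns nums).takeWhile (fun x => x == 1)).length = pvA (pvSigns nums) from rfl] at hi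
  rw [hi]
  by_cases ha0 : pvA (pvSigns nums) = 0
  · rw [if_pos ha0]
    symm
    rw [decide_eq_false_iff_not]
    exact fun h => h.1 ha0
  · rw [if_neg ha0]
    have hj := pvClimbDown_spec nums nums.length (pvA (pvSigns nums)) (by omega)
    rw [show (((pvSigns nums).drop (pvA (pvSigns nums))).takeWhile (fun x => x == -1)).length
        = pvB (pvSigns nums) from rfl] at hj
    rw [hj]
    by_cases hb0 : pvB (pvSigns nums) = 0
    · rw [if_pos (by omega)]
      symm
      rw [decide_eq_false_iff_not]
      exact fun h => h.2.1 hb0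
    · rw [if_neg (by omega)]
      have hk := pvClimbUp_spec nums nums.length (pvA (pvSigns nums) + pvB (pvSigns nums)) (by omega)
      rw [show (((pvSigns nums).drop (pvA (pvSigns nums) + pvB (pvSigns nums))).takeWhile
          (fun x => x == 1)).length = pvC (pvSigns nums) from rfl] at hk
      rw [hk]
      by_cases hc0 : pvC (pvSigns nums) = 0
      · rw [if_pos (by omega)]
        symm
        rw [decide_eq_false_iff_not]
        exact fun h => h.2.2.1 hc0
      · rw [if_neg (by omega)]
        refine decide_eq_decide.mpr ?_
        rw [List.drop_eq_nil_iff]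
        constructor
        · intro h
          exact ⟨ha0, hb0, hc0, by omega⟩
        · rintro ⟨-, -, -, h⟩
          omega

theorem isTrionic_spec : Claim_equal_isTrionic := by
  intro nums _
  unfold Spec_isTrionic
  exact isTrionic_eq_alt nums
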